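-- pv_equiv track=rewrite | github.com/PraiseTheDotNet/Python | lab2/task3.py | inset_without_regex
-- ===== SOURCE A (Python) =====
-- def inset_without_regex(input: str):
--     result = ''
--     index = 0
--     for i in range(1, len(input) + 1):
--         if i == len(input):
--             result += input[index:]
--         elif input[i] != input[index]:
--             result += input[index:i] + '*'
--             index = i
--     return result
-- ===== SOURCE B (Python) =====
-- def inset_without_regex(input: str):
--     runs = []
--     for ch in input:
--         if runs and runs[-1][-1] == ch:
--             runs[-1].append(ch)
--         else:
--             runs.append([ch])
--     return '*'.join(''.join(r) for r in runs)
-- ===== Notes on version B (the rewrite author's own statement) =====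
-- stated objective: idiomatic
-- what changed: Replaced the index/slice compare loop (result built from slices and a current-run start index) by a run-collecting pass that appends each char to the last run or starts a new run, then joins the runs with the separator.
import Mathlib
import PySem

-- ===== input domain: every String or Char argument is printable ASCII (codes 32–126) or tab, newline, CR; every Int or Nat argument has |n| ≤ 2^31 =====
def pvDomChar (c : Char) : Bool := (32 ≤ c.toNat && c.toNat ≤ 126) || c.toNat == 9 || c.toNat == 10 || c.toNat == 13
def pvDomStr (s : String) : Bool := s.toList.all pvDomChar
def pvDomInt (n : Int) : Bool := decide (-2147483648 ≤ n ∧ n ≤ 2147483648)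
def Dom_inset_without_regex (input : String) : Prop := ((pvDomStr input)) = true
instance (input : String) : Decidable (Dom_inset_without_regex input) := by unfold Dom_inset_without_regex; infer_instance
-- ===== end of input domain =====

-- B collects the maximal runs of equal adjacent characters and joins them with the separator,
-- instead of A's index/slice loop; same result, idiomatic run-grouping (no speed claim).

-- ===== PORT A =====
-- one loop iteration of A: state = (result, index), i the loop variable
def aStep (s : List Char) (st : List Char × Int) (i : Int) : List Char × Int :=
  if i = (s.length : Int) then
    (st.1 ++ PySem.List.slice s (some st.2) none, st.2)
  else if PySem.List.pyGetD s i ' ' ≠ PySem.List.pyGetD s st.2 ' ' then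
    (st.1 ++ PySem.List.slice s (some st.2) (some i) ++ ['*'], i)
  else st

def inset_without_regex (input : String) : String :=
  let s := input.toList
  String.ofList (((PySem.List.pyRange 1 ((s.length : Int) + 1) 1).foldl (aStep s) ([], 0)).1)

-- ===== PORT B =====
-- one loop iteration of B: runs[-1].append(ch) or runs.append([ch])
def pvRunsStep (runs : List (List Char)) (ch : Char) : List (List Char) :=
  if runs ≠ [] ∧ PySem.List.pyGetD (PySem.List.pyGetD runs (-1) []) (-1) ' ' = ch then
    runs.dropLast ++ [PySem.List.pyGetD runs (-1) [] ++ [ch]]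
  else
    runs ++ [[ch]]

def inset_without_regex_alt (input : String) : String :=
  String.ofList (List.intercalate ['*'] (input.toList.foldl pvRunsStep []))

-- ===== PRECONDITION & SPEC =====
def Spec_inset_without_regex (input : String) (out : String) : Prop := out = inset_without_regex_alt input
instance (input : String) (out : String) : Decidable (Spec_inset_without_regex input out) := by unfold Spec_inset_without_regex; infer_instance

-- ===== CLAIM (what is proved, stated in full; the proofs are below) =====
def Claim_equal_inset_without_regex : Prop := ∀ (input : String), Dom_inset_without_regex input → Spec_inset_without_regex input (inset_without_regex input)

-- ===== LEMMAS AND PROOFS =====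

-- common specification: output after the first character, given the previous character
def tailGo : Char → List Char → List Char
  | _, [] => []
  | c, x :: xs => (if x = c then [x] else ['*', x]) ++ tailGo x xs

theorem intercalate_cons_cons (sep a b : List Char) (rs : List (List Char)) :
    List.intercalate sep (a :: b :: rs) = a ++ sep ++ List.intercalate sep (b :: rs) := by
  simp [List.intercalate]

theorem intercalate_snoc_append (sep : List Char) (rs : List (List Char)) (v w : List Char) :
    List.intercalate sep (rs ++ [v ++ w]) = List.intercalate sep (rs ++ [v]) ++ w := by
  induction rs with
  | nil => simp [List.intercalate]
  | cons a rs ih =>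
      cases rs with
      | nil => rw [List.nil_append] at ih; simp [intercalate_cons_cons, ih]
      | cons b rs' =>
          simp only [List.cons_append] at ih ⊢
          rw [intercalate_cons_cons, intercalate_cons_cons, ih]
          simp

theorem intercalate_append_singleton (sep : List Char) (rs : List (List Char)) (v : List Char)
    (h : rs ≠ []) :
    List.intercalate sep (rs ++ [v]) = List.intercalate sep rs ++ sep ++ v := by
  induction rs with
  | nil => cases h rfl
  | cons a rs ih =>
      cases rs with
      | nil => simp [intercalate_cons_cons, List.intercalate]
      | cons b rs' =>
          have ih' := ih (by simp)
          simp only [List.cons_append] at ih' ⊢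
          rw [intercalate_cons_cons, intercalate_cons_cons, ih']
          simp

-- B-side loop invariant
theorem b_loop (l : List Char) : ∀ (rs : List (List Char)) (r : List Char) (c : Char),
    List.intercalate ['*'] (List.foldl pvRunsStep (rs ++ [r ++ [c]]) l)
      = List.intercalate ['*'] (rs ++ [r ++ [c]]) ++ tailGo c l := by
  induction l with
  | nil => intro rs r c; simp [tailGo]
  | cons x xs ih =>
      intro rs r c
      simp only [List.foldl_cons]
      have hlast : PySem.List.pyGetD (rs ++ [r ++ [c]]) (-1) [] = r ++ [c] :=
        PySem.List.pyGetD_neg_one_append_singleton ..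
      have hc : PySem.List.pyGetD (r ++ [c]) (-1) ' ' = c :=
        PySem.List.pyGetD_neg_one_append_singleton ..
      by_cases hxc : x = c
      · have hcond : pvRunsStep (rs ++ [r ++ [c]]) x = rs ++ [(r ++ [c]) ++ [x]] := by
          simp [pvRunsStep, hlast, hc, hxc]
        rw [hcond, ih rs (r ++ [c]) x, intercalate_snoc_append]
        simp [tailGo, hxc]
      · have hcx : ¬ (c = x) := fun h => hxc h.symm
        have hcond : pvRunsStep (rs ++ [r ++ [c]]) x = (rs ++ [r ++ [c]]) ++ [[x]] := by
          simp [pvRunsStep, hlast, hc, hcx]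
        rw [hcond]
        have := ih (rs ++ [r ++ [c]]) [] x
        simp only [List.nil_append] at this
        rw [this, intercalate_append_singleton _ _ _ (by simp)]
        simp [tailGo, hxc]

theorem b_char (s : List Char) :
    List.intercalate ['*'] (s.foldl pvRunsStep [])
      = match s with
        | [] => []
        | x :: xs => x :: tailGo x xs := by
  cases s with
  | nil => simp [List.intercalate]
  | cons x xs =>
      simp only [List.foldl_cons]
      have h0 : pvRunsStep [] x = [] ++ [[] ++ [x]] := by simp [pvRunsStep]
      rw [h0, b_loop xs [] [] x]
      simp [List.intercalate, List.intersperse]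

-- A-side loop invariant, fuel = s.length - j
theorem a_loop (s : List Char) : ∀ (fuel j index : Nat) (r : List Char),
    s.length - j = fuel → index ≤ j → j ≤ s.length →
    ∃ idx, (PySem.List.pyRange (j : Int) ((s.length : Int) + 1) 1).foldl (aStep s) (r, (index : Int))
      = (r ++ (s.drop index).take (j - index) ++ tailGo (s.getD index ' ') (s.drop j), idx) := by
  intro fuel
  induction fuel with
  | zero =>
      intro j index r hfuel hij hjn
      have hj : j = s.length := by omega
      subst hj
      have hcons : PySem.List.pyRange (s.length : Int) ((s.length : Int) + 1) 1
          = (s.length : Int) :: PySem.List.pyRange ((s.length : Int) + 1) ((s.length : Int) + 1) 1 :=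
        PySem.List.pyRange_one_cons (by omega)
      rw [hcons]
      have hempty : PySem.List.pyRange ((s.length : Int) + 1) ((s.length : Int) + 1) 1 = [] := by
        simp [PySem.List.pyRange]
      simp only [List.foldl_cons, hempty, List.foldl_nil]
      refine ⟨(index : Int), ?_⟩
      simp only [aStep, if_pos rfl]
      have hslice : PySem.List.slice s (some (index : Int)) none = s.drop index :=
        PySem.List.slice_from_natCast ..
      have htake : (s.drop index).take (s.length - index) = s.drop index := by
        apply List.take_of_length_le; simp
      simp [hslice, htake, tailGo]
  | succ fuel ih =>
      intro j index r hfuel hij hjn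
      have hjlt : j < s.length := by omega
      have hcons : PySem.List.pyRange (j : Int) ((s.length : Int) + 1) 1
          = (j : Int) :: PySem.List.pyRange ((j : Int) + 1) ((s.length : Int) + 1) 1 :=
        PySem.List.pyRange_one_cons (by omega)
      have hj1 : ((j : Int) + 1) = ((j + 1 : Nat) : Int) := by push_cast; ring
      rw [hcons, hj1]
      simp only [List.foldl_cons]
      have hne : ((j : Int)) ≠ (s.length : Int) := by omega
      have hgj : PySem.List.pyGetD s (j : Int) ' ' = s.getD j ' ' := PySem.List.pyGetD_natCast ..
      have hgi : PySem.List.pyGetD s (index : Int) ' ' = s.getD index ' ' := PySem.List.pyGetD_natCast ..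
      have hdropj : s.drop j = s[j] :: s.drop (j + 1) := by
        rw [List.drop_eq_getElem_cons hjlt]
      have hgetj : s.getD j ' ' = s[j] := by
        simp [List.getD, List.getElem?_eq_getElem hjlt]
      by_cases hdiff : s.getD j ' ' = s.getD index ' '
      · -- characters equal: state unchanged
        have hcond : ¬ (PySem.List.pyGetD s (j : Int) ' ' ≠ PySem.List.pyGetD s (index : Int) ' ') := by
          rw [hgj, hgi]; exact not_not_intro hdiff
        have hstep : aStep s (r, (index : Int)) (j : Int) = (r, (index : Int)) := by
          unfold aStep; rw [if_neg hne, if_neg hcond]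
        rw [hstep]
        obtain ⟨idx, hfold⟩ := ih (j + 1) index r (by omega) (by omega) (by omega)
        refine ⟨idx, ?_⟩
        rw [hfold]
        have htake : (s.drop index).take (j + 1 - index) = (s.drop index).take (j - index) ++ [s[j]] := by
          have : j + 1 - index = (j - index) + 1 := by omega
          rw [this, List.take_succ]
          have : (s.drop index)[j - index]? = some s[j] := by
            rw [List.getElem?_drop]
            have : index + (j - index) = j := by omega
            rw [this, List.getElem?_eq_getElem hjlt]
          simp [this]
        have hxc : s[j] = s.getD index ' ' := by rw [← hgetj, hdiff]
        rw [htake, hdropj, tailGo, if_pos hxc, ← hxc]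
        simp
      · -- characters differ: emit slice + '*', index := j
        have hcond : PySem.List.pyGetD s (j : Int) ' ' ≠ PySem.List.pyGetD s (index : Int) ' ' := by
          rw [hgj, hgi]; exact hdiff
        have hstep : aStep s (r, (index : Int)) (j : Int)
            = (r ++ PySem.List.slice s (some (index : Int)) (some (j : Int)) ++ ['*'], (j : Int)) := by
          unfold aStep; rw [if_neg hne, if_pos hcond]
        rw [hstep]
        obtain ⟨idx, hfold⟩ := ih (j + 1) j (r ++ PySem.List.slice s (some (index : Int)) (some (j : Int)) ++ ['*'])
          (by omega) (by omega) (by omega)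
        refine ⟨idx, ?_⟩
        rw [hfold]
        have hslice : PySem.List.slice s (some (index : Int)) (some (j : Int))
            = (s.drop index).take (j - index) := PySem.List.slice_natCast ..
        have htake1 : (s.drop j).take (j + 1 - j) = [s[j]] := by
          have h1 : j + 1 - j = 1 := by omega
          rw [h1, hdropj, List.take_succ_cons, List.take_zero]
        have hxc : ¬ (s[j] = s.getD index ' ') := by rw [← hgetj]; exact hdiff
        rw [hslice, htake1, hdropj, tailGo, if_neg hxc, hgetj]
        simp

theorem a_char (s : List Char) :
    ((PySem.List.pyRange 1 ((s.length : Int) + 1) 1).foldl (aStep s) ([], 0)).1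
      = match s with
        | [] => []
        | x :: xs => x :: tailGo x xs := by
  cases s with
  | nil => simp [PySem.List.pyRange]
  | cons x xs =>
      have hlen : 1 ≤ (x :: xs).length := by simp
      obtain ⟨idx, hfold⟩ := a_loop (x :: xs) ((x :: xs).length - 1) 1 0 [] rfl (by omega) hlen
      push_cast at hfold
      rw [hfold]
      simp [tailGo]

-- ===== VERDICT (by name: the statement is the Claim_ definition above) =====
theorem inset_without_regex_spec : Claim_equal_inset_without_regex := by
  intro input _
  show _ = _
  simp only [inset_without_regex, inset_without_regex_alt]
  rw [a_char, b_char]
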